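-- pv_equiv track=rewrite | github.com/sejongkang/algorithm | 2.고급 자료구조/4195_친구네트워크.py | dfs
-- ===== SOURCE A (Python) =====
-- def dfs(graph):
--     counts=[]
--     for i in range(len(graph)):
--         visited, need_visit = list(), list()
--         start_node = list(graph.keys())[i]
--         need_visit.append(str(start_node))
--         count = 1
--         while need_visit:
--             # pop 인덱스 없으면 스택
--             node = need_visit.pop()
--             if node not in visited:
--                 visited.append(node)
--                 if node in graph:
--                     need_visit.append(graph[node])
--                 else:
--                     counts.append(count)
--                 count += 1
--             else:
--                 counts.append(count)
--     return max(counts)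
-- ===== SOURCE B (Python) =====
-- def dfs(graph):
--     # Memoized: each node's chain value is computed once and reused across keys.
--     val = {}
--     for start in graph:
--         node = str(start)
--         path = []
--         on_path = set()
--         while node in graph and node not in val and node not in on_path:
--             on_path.add(node)
--             path.append(node)
--             node = graph[node]
--         if node in on_path:
--             i = path.index(node)
--             base = len(path) - i + 1
--             for x in path[i:]:
--                 val[x] = base
--             path = path[:i]
--         elif node in val:
--             base = val[node]
--         else:
--             base = 1
--             val[node] = base
--         for x in reversed(path):
--             base += 1
--             val[x] = base
--     return max(val[k] for k in graph)
-- ===== Notes on version B (the rewrite author's own statement) =====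
-- stated objective: faster
-- what changed: Replaces A's independent fresh walk per key (stack + linear visited-list scans) with a single memoized dynamic-programming pass: a shared value dict is filled once per node, cycles are collapsed via path.index and values assigned backwards along each new path, so no node's chain is ever re-walked.
-- outside the precondition, e.g. on dfs({}): A raises ValueError, B raises ValueError
import Mathlib
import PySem

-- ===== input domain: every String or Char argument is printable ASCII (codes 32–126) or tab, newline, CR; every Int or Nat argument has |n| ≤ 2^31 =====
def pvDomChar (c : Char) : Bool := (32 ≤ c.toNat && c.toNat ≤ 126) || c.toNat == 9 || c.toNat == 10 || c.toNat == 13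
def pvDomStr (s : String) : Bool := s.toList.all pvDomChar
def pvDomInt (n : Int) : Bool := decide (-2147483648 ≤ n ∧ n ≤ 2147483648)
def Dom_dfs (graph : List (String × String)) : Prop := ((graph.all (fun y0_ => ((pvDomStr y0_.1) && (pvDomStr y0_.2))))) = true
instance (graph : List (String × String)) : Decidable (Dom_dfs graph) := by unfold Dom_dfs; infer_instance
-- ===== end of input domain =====

-- B replaces A's per-key fresh walks with one memoized pass: a shared value dict, cycle collapse
-- via path.index, and backward assignment along each new path (objective: faster; equivalence of
-- return values on non-empty graphs is proved below).


-- Two facts about the termination measure of the walks (the number of not-yet-visited dict keys);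
-- the recursive definitions below cite them in their decreasing_by blocks.
theorem pvFilter_add_le (l visited : List String) (node : String) :
    (l.filter (fun k => !(visited ++ [node]).contains k)).length
      ≤ (l.filter (fun k => !visited.contains k)).length := by
  have h : ∀ k : String, (!(visited ++ [node]).contains k)
      = ((!(decide (node = k))) && !visited.contains k) := by
    intro k; simp [Bool.and_comm, eq_comm]
  simp only [h, ← List.filter_filter]
  exact List.length_filter_le _ _

theorem pvFilter_add_lt (l visited : List String) (node : String) (h1 : node ∈ l)
    (h2 : visited.contains node = false) :
    (l.filter (fun k => !(visited ++ [node]).contains k)).length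
      < (l.filter (fun k => !visited.contains k)).length := by
  have h : ∀ k : String, (!(visited ++ [node]).contains k)
      = ((!(decide (node = k))) && !visited.contains k) := by
    intro k; simp [Bool.and_comm, eq_comm]
  simp only [h, ← List.filter_filter]
  apply List.length_filter_lt_length_iff_exists.mpr
  refine ⟨node, by simp only [List.mem_filter]; exact ⟨h1, by simpa using h2⟩, by simp⟩

theorem pvMemKeys_of_get? (g : PySem.Dict String String) (k v : String)
    (h : PySem.Dict.get? g k = some v) : k ∈ PySem.Dict.keys g := by
  by_contra hk
  rw [(PySem.Dict.get?_eq_none_iff_not_mem_keys g k).mpr hk] at h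
  simp at h

-- ===== PORT A =====
-- A's inner while loop. Python appends/pops at the END of need_visit; here the stack top is the
-- list HEAD (append = cons, pop = uncons), a faithful representation of the same stack.
def dfsLoopA (g : PySem.Dict String String) (visited : List String) (need_visit : List String)
    (count : Int) (counts : List Int) : List Int :=
  match need_visit with
  | [] => counts
  | node :: rest =>
    if hv : visited.contains node then
      -- node already visited: counts.append(count)
      dfsLoopA g visited rest count (counts ++ [count])
    else
      match hg : PySem.Dict.get? g node with
      | some nxt => dfsLoopA g (visited ++ [node]) (nxt :: rest) (count + 1) counts
      | none => dfsLoopA g (visited ++ [node]) rest (count + 1) (counts ++ [count])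
  termination_by 2 * ((PySem.Dict.keys g).filter (fun k => !visited.contains k)).length + need_visit.length
  decreasing_by
  · simp only [List.length_cons]; omega
  · have hlt := pvFilter_add_lt (PySem.Dict.keys g) visited node
      (pvMemKeys_of_get? g node nxt hg) (eq_false_of_ne_true hv)
    simp only [List.length_cons]
    omega
  · have hle := pvFilter_add_le (PySem.Dict.keys g) visited node
    simp only [List.length_cons]
    omega

def dfs (graph : List (String × String)) : Int :=
  let g := PySem.Dict.ofList graph
  let keys := PySem.Dict.keys g
  -- for i in range(len(graph)): start_node = list(graph.keys())[i] (str() is a no-op on str keys)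
  let counts := (PySem.List.pyRange 0 (keys.length : Int) 1).foldl
    (fun counts i => dfsLoopA g [] [PySem.List.pyGetD keys i ""] 1 counts) []
  -- max(counts): raises ValueError on an empty dict, excluded by Pre_dfs
  (PySem.List.max? counts (fun x => x)).getD 0

-- ===== PORT B =====
-- B's inner while loop: collect the path of new keys until a dead end, a memoized node, or a revisit.
def walkB (g : PySem.Dict String String) (val : PySem.Dict String Int)
    (on_path : PySem.Set String) (path : List String) (node : String) :
    List String × PySem.Set String × String :=
  match hg : PySem.Dict.get? g node with
  | none => (path, on_path, node)
  | some nxt =>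
    if hv : PySem.Dict.contains val node || PySem.Set.contains on_path node then
      (path, on_path, node)
    else
      walkB g val (PySem.Set.add on_path node) (path ++ [node]) nxt
  termination_by ((PySem.Dict.keys g).filter (fun k => !PySem.Set.contains on_path k)).length
  decreasing_by
  · have hc : PySem.Set.contains on_path node = false := by
      rcases Bool.or_eq_false_iff.mp (Bool.eq_false_iff.mpr hv) with ⟨_, h2⟩
      exact h2
    have hmem : node ∉ on_path := by simpa [PySem.Set.contains] using hc
    have hadd : PySem.Set.add on_path node = on_path ++ [node] := by
      simp [PySem.Set.add, PySem.Set.contains, hmem]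
    rw [hadd]
    exact pvFilter_add_lt (PySem.Dict.keys g) on_path node
      (pvMemKeys_of_get? g node nxt hg) hc

-- One iteration of B's outer loop: resolve one start key, updating the shared value dict.
def stepB (g : PySem.Dict String String) (val : PySem.Dict String Int) (start : String) :
    PySem.Dict String Int :=
  -- node = str(start) is the identity on string keys
  let r := walkB g val PySem.Set.empty [] start
  let path := r.1
  let on_path := r.2.1
  let node := r.2.2
  let vbp : PySem.Dict String Int × Int × List String :=
    if PySem.Set.contains on_path node then
      -- cycle: i = path.index(node); Python's .index cannot fail here (node is on the path)
      let i := (PySem.List.index? path node).getD 0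
      let base : Int := (path.length : Int) - (i : Int) + 1
      ((path.drop i).foldl (fun v x => PySem.Dict.insert v x base) val, base, path.take i)
    else if PySem.Dict.contains val node then
      (val, PySem.Dict.getD val node 0, path)
    else
      (PySem.Dict.insert val node 1, 1, path)
  -- for x in reversed(path): base += 1; val[x] = base
  (vbp.2.2.reverse.foldl (fun (vb : PySem.Dict String Int × Int) x =>
      (PySem.Dict.insert vb.1 x (vb.2 + 1), vb.2 + 1)) (vbp.1, vbp.2.1)).1

def dfs_alt (graph : List (String × String)) : Int :=
  let g := PySem.Dict.ofList graph
  let valF := (PySem.Dict.keys g).foldl (fun val k => stepB g val k) PySem.Dict.empty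
  -- max(val[k] for k in graph): every key is in val; raises ValueError on an empty dict (Pre_dfs)
  (PySem.List.max? ((PySem.Dict.keys g).map (fun k => PySem.Dict.getD valF k 0)) (fun x => x)).getD 0

-- ===== PRECONDITION & SPEC =====
-- Pre_ excludes only the empty dict, on which Python's max of an empty sequence raises ValueError
-- (in A and in B alike).
def Pre_dfs (graph : List (String × String)) : Prop := graph ≠ []
instance (graph : List (String × String)) : Decidable (Pre_dfs graph) := by unfold Pre_dfs; infer_instance
def pvWitness_dfs : (List (String × String)) := [("a", "b")]

def Spec_dfs (graph : List (String × String)) (out : Int) : Prop := out = dfs_alt graph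
instance (graph : List (String × String)) (out : Int) : Decidable (Spec_dfs graph out) := by unfold Spec_dfs; infer_instance

-- ===== CLAIM (what is proved, stated in full; the proofs are below) =====
def Claim_equal_dfs : Prop := ∀ (graph : List (String × String)), Dom_dfs graph → Pre_dfs graph → Spec_dfs graph (dfs graph)

-- ===== LEMMAS AND PROOFS =====

-- Specification walk (proof-side only): the value A's fresh walk from `node` produces.
def chainW (g : PySem.Dict String String) (visited : List String) (node : String)
    (count : Int) : Int :=
  if hv : visited.contains node then count
  else
    match hg : PySem.Dict.get? g node with
    | some nxt => chainW g (visited ++ [node]) nxt (count + 1)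
    | none => count
  termination_by ((PySem.Dict.keys g).filter (fun k => !visited.contains k)).length
  decreasing_by
  · exact pvFilter_add_lt (PySem.Dict.keys g) visited node
      (pvMemKeys_of_get? g node nxt hg) (eq_false_of_ne_true hv)

-- The nodes the specification walk examines (including the node it stops at).
def traceW (g : PySem.Dict String String) (visited : List String) (node : String) : List String :=
  if hv : visited.contains node then [node]
  else
    match hg : PySem.Dict.get? g node with
    | some nxt => node :: traceW g (visited ++ [node]) nxt
    | none => [node]
  termination_by ((PySem.Dict.keys g).filter (fun k => !visited.contains k)).length
  decreasing_by
  · exact pvFilter_add_lt (PySem.Dict.keys g) visited node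
      (pvMemKeys_of_get? g node nxt hg) (eq_false_of_ne_true hv)

-- ---------- A-side reduction: dfs = max over keys of the fresh-walk value ----------

-- One run of A's while loop from a singleton stack appends exactly one count:
-- the fresh-walk value from the same visited list.
theorem dfs_loop_eq (g : PySem.Dict String String) :
    ∀ (μ : Nat) (visited : List String) (node : String) (count : Int) (counts : List Int),
      ((PySem.Dict.keys g).filter (fun k => !visited.contains k)).length ≤ μ →
      dfsLoopA g visited [node] count counts = counts ++ [chainW g visited node count] := by
  intro μ
  induction μ using Nat.strong_induction_on with
  | _ μ ih =>
    intro visited node count counts hle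
    rw [dfsLoopA, chainW]
    by_cases hv : visited.contains node
    · simp only [hv, reduceDIte]
      rw [dfsLoopA]
    · simp only [hv, reduceDIte, Bool.false_eq_true]
      cases hg : PySem.Dict.get? g node with
      | none => rw [dfsLoopA]
      | some nxt =>
        have hlt := pvFilter_add_lt (PySem.Dict.keys g) visited node
          (pvMemKeys_of_get? g node nxt hg) (eq_false_of_ne_true hv)
        exact ih _ (by omega) (visited ++ [node]) nxt (count + 1) counts (le_refl _)

theorem dfs_foldl_eq (g : PySem.Dict String String) (ks : List String) (acc : List Int) :
    ks.foldl (fun counts k => dfsLoopA g [] [k] 1 counts) acc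
      = acc ++ ks.map (fun k => chainW g [] k 1) := by
  induction ks generalizing acc with
  | nil => simp
  | cons k ks ih =>
    simp only [List.foldl_cons, List.map_cons]
    rw [dfs_loop_eq g _ [] k 1 acc (le_refl _), ih]
    simp

-- ---------- successor-path predicate ----------

-- StepSeq g p z: each element of p maps (via g) to the next one, and the last maps to z.
def StepSeq (g : PySem.Dict String String) : List String → String → Prop
  | [], _ => True
  | x :: xs, z => PySem.Dict.get? g x = some (xs.headD z) ∧ StepSeq g xs z

theorem headD_append (a b : List String) (z : String) :
    (a ++ b).headD z = a.headD (b.headD z) := by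
  cases a <;> simp

theorem StepSeq_append (g : PySem.Dict String String) (a b : List String) (z : String)
    (ha : StepSeq g a (b.headD z)) (hb : StepSeq g b z) : StepSeq g (a ++ b) z := by
  induction a with
  | nil => simpa
  | cons x xs ih =>
    obtain ⟨h1, h2⟩ := ha
    refine ⟨?_, ih h2⟩
    rw [show xs.append b = xs ++ b from rfl, headD_append]
    exact h1

theorem StepSeq_drop (g : PySem.Dict String String) (p : List String) (z : String)
    (h : StepSeq g p z) : ∀ j, StepSeq g (p.drop j) z := by
  induction p with
  | nil => intro j; simp [StepSeq]
  | cons x xs ih =>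
    intro j
    cases j with
    | zero => exact h
    | succ j => exact ih h.2 j

theorem StepSeq_take (g : PySem.Dict String String) (p : List String) (z : String)
    (h : StepSeq g p z) : ∀ k, StepSeq g (p.take k) ((p.drop k).headD z) := by
  induction p generalizing z with
  | nil => intro k; simp [StepSeq]
  | cons x xs ih =>
    intro k
    cases k with
    | zero => simp [StepSeq]
    | succ k =>
      refine ⟨?_, ih _ h.2 k⟩
      simp only [List.take_succ_cons, List.drop_succ_cons]
      rw [← headD_append (xs.take k) (xs.drop k) z]
      simpa using h.1

theorem StepSeq_succ (g : PySem.Dict String String) (p : List String) (z : String)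
    (h : StepSeq g p z) : ∀ x ∈ p, ∀ y, PySem.Dict.get? g x = some y → y ∈ p ∨ y = z := by
  induction p with
  | nil => simp
  | cons a as ih =>
    intro x hx y hy
    rcases List.mem_cons.mp hx with rfl | hx
    · have : y = as.headD z := by rw [h.1] at hy; exact (Option.some_inj.mp hy).symm
      subst this
      cases as with
      | nil => right; rfl
      | cons b bs => left; simp
    · rcases ih h.2 x hx y hy with h' | h'
      · left; exact List.mem_cons_of_mem _ h'
      · right; exact h'

theorem StepSeq_last (g : PySem.Dict String String) (ys : List String) (y z : String)
    (h : StepSeq g (ys ++ [y]) z) : PySem.Dict.get? g y = some z := by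
  induction ys with
  | nil => simpa using h.1
  | cons a as ih => exact ih h.2

-- ---------- basic chainW / traceW facts ----------

theorem chainW_mem (g : PySem.Dict String String) (v : List String) (y : String) (c : Int)
    (h : y ∈ v) : chainW g v y c = c := by
  rw [chainW]; split
  · rfl
  · rename_i hcon; exact absurd (by simpa using h) hcon

theorem chainW_not_mem_none (g : PySem.Dict String String) (v : List String) (y : String)
    (c : Int) (h : y ∉ v) (hg : PySem.Dict.get? g y = none) : chainW g v y c = c := by
  rw [chainW]; split
  · rfl
  · split
    · rename_i heq; rw [hg] at heq; cases heq
    · rfl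

theorem chainW_not_mem_some (g : PySem.Dict String String) (v : List String) (y nxt : String)
    (c : Int) (h : y ∉ v) (hg : PySem.Dict.get? g y = some nxt) :
    chainW g v y c = chainW g (v ++ [y]) nxt (c + 1) := by
  rw [chainW]; split
  · rename_i hcon; exact absurd (by simpa using hcon) h
  · split
    · rename_i heq; rw [hg] at heq; cases heq; rfl
    · rename_i heq; rw [hg] at heq; cases heq

theorem traceW_mem (g : PySem.Dict String String) (v : List String) (y : String)
    (h : y ∈ v) : traceW g v y = [y] := by
  rw [traceW]; split
  · rfl
  · rename_i hcon; exact absurd (by simpa using h) hcon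

theorem traceW_not_mem_none (g : PySem.Dict String String) (v : List String) (y : String)
    (h : y ∉ v) (hg : PySem.Dict.get? g y = none) : traceW g v y = [y] := by
  rw [traceW]; split
  · rfl
  · split
    · rename_i heq; rw [hg] at heq; cases heq
    · rfl

theorem traceW_not_mem_some (g : PySem.Dict String String) (v : List String) (y nxt : String)
    (h : y ∉ v) (hg : PySem.Dict.get? g y = some nxt) :
    traceW g v y = y :: traceW g (v ++ [y]) nxt := by
  rw [traceW]; split
  · rename_i hcon; exact absurd (by simpa using hcon) h
  · split
    · rename_i heq; rw [hg] at heq; cases heq; rfl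
    · rename_i heq; rw [hg] at heq; cases heq

theorem mem_self_traceW (g : PySem.Dict String String) (v : List String) (y : String) :
    y ∈ traceW g v y := by
  by_cases hv : y ∈ v
  · rw [traceW_mem g v y hv]; simp
  · cases hg : PySem.Dict.get? g y with
    | none => rw [traceW_not_mem_none g v y hv hg]; simp
    | some nxt => rw [traceW_not_mem_some g v y nxt hv hg]; simp

theorem chainW_count (g : PySem.Dict String String) :
    ∀ (μ : Nat) (v : List String) (y : String) (c k : Int),
      ((PySem.Dict.keys g).filter (fun x => !v.contains x)).length ≤ μ →
      chainW g v y (c + k) = chainW g v y c + k := by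
  intro μ
  induction μ using Nat.strong_induction_on with
  | _ μ ih =>
    intro v y c k hle
    by_cases hv : y ∈ v
    · rw [chainW_mem g v y _ hv, chainW_mem g v y _ hv]
    · cases hg : PySem.Dict.get? g y with
      | none => rw [chainW_not_mem_none g v y _ hv hg, chainW_not_mem_none g v y _ hv hg]
      | some nxt =>
        rw [chainW_not_mem_some g v y nxt _ hv hg, chainW_not_mem_some g v y nxt _ hv hg]
        have hlt := pvFilter_add_lt (PySem.Dict.keys g) v y
          (pvMemKeys_of_get? g y nxt hg) (by simpa using hv)
        have harr : c + k + 1 = c + 1 + k := by ring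
        rw [harr]
        exact ih _ (by omega) (v ++ [y]) nxt (c + 1) k (le_refl _)

theorem chainW_congr (g : PySem.Dict String String) :
    ∀ (μ : Nat) (v v' : List String) (y : String) (c : Int),
      ((PySem.Dict.keys g).filter (fun x => !v.contains x)).length ≤ μ →
      (∀ w, w ∈ v ↔ w ∈ v') →
      chainW g v y c = chainW g v' y c := by
  intro μ
  induction μ using Nat.strong_induction_on with
  | _ μ ih =>
    intro v v' y c hle hc
    by_cases hv : y ∈ v
    · rw [chainW_mem g v y _ hv, chainW_mem g v' y _ ((hc y).mp hv)]
    · have hv' : y ∉ v' := fun h => hv ((hc y).mpr h)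
      cases hg : PySem.Dict.get? g y with
      | none => rw [chainW_not_mem_none g v y _ hv hg, chainW_not_mem_none g v' y _ hv' hg]
      | some nxt =>
        rw [chainW_not_mem_some g v y nxt _ hv hg, chainW_not_mem_some g v' y nxt _ hv' hg]
        have hlt := pvFilter_add_lt (PySem.Dict.keys g) v y
          (pvMemKeys_of_get? g y nxt hg) (by simpa using hv)
        exact ih _ (by omega) (v ++ [y]) (v' ++ [y]) nxt (c + 1) (le_refl _)
          (by intro w; simp [hc w])

-- Adding to the visited list nodes the walk never examines changes nothing.
theorem chainW_avoid (g : PySem.Dict String String) :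
    ∀ (μ : Nat) (v w : List String) (y : String) (c : Int),
      ((PySem.Dict.keys g).filter (fun x => !v.contains x)).length ≤ μ →
      (∀ x ∈ w, x ∉ traceW g v y) →
      chainW g (v ++ w) y c = chainW g v y c := by
  intro μ
  induction μ using Nat.strong_induction_on with
  | _ μ ih =>
    intro v w y c hle havoid
    have hyw : y ∉ w := fun hy => havoid y hy (mem_self_traceW g v y)
    by_cases hv : y ∈ v
    · rw [chainW_mem g _ y _ (List.mem_append_left _ hv), chainW_mem g v y _ hv]
    · have hv2 : y ∉ v ++ w := by
        intro h; rcases List.mem_append.mp h with h | h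
        · exact hv h
        · exact hyw h
      cases hg : PySem.Dict.get? g y with
      | none => rw [chainW_not_mem_none g _ y _ hv2 hg, chainW_not_mem_none g v y _ hv hg]
      | some nxt =>
        rw [chainW_not_mem_some g _ y nxt _ hv2 hg, chainW_not_mem_some g v y nxt _ hv hg]
        have hlt := pvFilter_add_lt (PySem.Dict.keys g) v y
          (pvMemKeys_of_get? g y nxt hg) (by simpa using hv)
        have htr := traceW_not_mem_some g v y nxt hv hg
        have havoid' : ∀ x ∈ w, x ∉ traceW g (v ++ [y]) nxt := by
          intro x hx hmem
          exact havoid x hx (by rw [htr]; exact List.mem_cons_of_mem _ hmem)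
        calc chainW g (v ++ w ++ [y]) nxt (c + 1)
            = chainW g (v ++ [y] ++ w) nxt (c + 1) := by
              apply chainW_congr g (((PySem.Dict.keys g).filter
                (fun x => !(v ++ w ++ [y]).contains x)).length) _ _ _ _ (le_refl _)
              intro x; simp only [List.mem_append, List.mem_singleton]; tauto
          _ = chainW g (v ++ [y]) nxt (c + 1) := ih _ (by omega) (v ++ [y]) w nxt (c + 1)
              (le_refl _) havoid'

-- Unrolling the walk along an explicit successor path of fresh nodes.
theorem chain_unroll (g : PySem.Dict String String) (p : List String) (z : String) :
    StepSeq g p z → p.Nodup → ∀ (v : List String) (c : Int),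
      (∀ x ∈ p, x ∉ v) →
      chainW g v (p.headD z) c = chainW g (v ++ p) z (c + p.length) := by
  induction p generalizing z with
  | nil => intro _ _ v c _; simp
  | cons x xs ih =>
    intro hss hnd v c hfresh
    have hvx : x ∉ v := hfresh x (by simp)
    rw [List.headD_cons, chainW_not_mem_some g v x _ c hvx hss.1]
    have hfresh' : ∀ y ∈ xs, y ∉ v ++ [x] := by
      intro y hy h
      rcases List.mem_append.mp h with h | h
      · exact hfresh y (by simp [hy]) h
      · exact (List.nodup_cons.mp hnd).1 ((List.mem_singleton.mp h) ▸ hy)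
    rw [ih z hss.2 (List.nodup_cons.mp hnd).2 (v ++ [x]) (c + 1) hfresh']
    have hl : v ++ [x] ++ xs = v ++ x :: xs := by simp
    rw [hl]
    congr 1
    simp only [List.length_cons]
    push_cast
    ring

theorem trace_unroll (g : PySem.Dict String String) (p : List String) (z : String) :
    StepSeq g p z → p.Nodup → ∀ (v : List String),
      (∀ x ∈ p, x ∉ v) →
      traceW g v (p.headD z) = p ++ traceW g (v ++ p) z := by
  induction p generalizing z with
  | nil => intro _ _ v _; simp
  | cons x xs ih =>
    intro hss hnd v hfresh
    have hvx : x ∉ v := hfresh x (by simp)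
    rw [List.headD_cons, traceW_not_mem_some g v x _ hvx hss.1]
    have hfresh' : ∀ y ∈ xs, y ∉ v ++ [x] := by
      intro y hy h
      rcases List.mem_append.mp h with h | h
      · exact hfresh y (by simp [hy]) h
      · exact (List.nodup_cons.mp hnd).1 ((List.mem_singleton.mp h) ▸ hy)
    rw [ih z hss.2 (List.nodup_cons.mp hnd).2 (v ++ [x]) hfresh']
    simp

-- ---------- the two value computations ----------

-- Every node of a cycle has fresh-walk value (length of the cycle) + 1.
theorem cycle_chain (g : PySem.Dict String String) (cyc : List String) (z : String)
    (hss : StepSeq g cyc z) (hnd : cyc.Nodup) (hhead : cyc.headD z = z) :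
    ∀ x ∈ cyc, chainW g [] x 1 = (cyc.length : Int) + 1 := by
  intro x hx
  obtain ⟨s, t, rfl⟩ := List.append_of_mem hx
  -- rotate the cycle to start at x
  have hsz : s.headD x = z := by
    cases s with
    | nil => simpa using hhead
    | cons a as => simpa using hhead
  have hdrop : (s ++ x :: t).drop s.length = x :: t := by simp
  have htake : (s ++ x :: t).take s.length = s := by simp
  have hb : StepSeq g (x :: t) z := by
    have h := StepSeq_drop g (s ++ x :: t) z hss s.length
    rwa [hdrop] at h
  have ha : StepSeq g s x := by
    have h := StepSeq_take g (s ++ x :: t) z hss s.length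
    rwa [htake, hdrop, List.headD_cons] at h
  have hrot : StepSeq g ((x :: t) ++ s) x := by
    apply StepSeq_append g (x :: t) s x _ ha
    rwa [hsz]
  have hndrot : ((x :: t) ++ s).Nodup := List.nodup_append_comm.mp hnd
  have hu := chain_unroll g ((x :: t) ++ s) x hrot hndrot [] 1 (by simp)
  have hhd : ((x :: t) ++ s).headD x = x := by simp
  rw [hhd, List.nil_append] at hu
  rw [hu, chainW_mem g _ x _ (by simp)]
  simp only [List.length_append, List.length_cons]
  push_cast
  ring

-- Values along a path that feeds into a node of known fresh-walk value V,
-- provided the walk from that node avoids the path.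
theorem tail_chain (g : PySem.Dict String String) (q : List String) (z : String) (V : Int)
    (hss : StepSeq g q z) (hnd : q.Nodup)
    (havoid : ∀ x ∈ q, x ∉ traceW g [] z)
    (hV : chainW g [] z 1 = V) :
    ∀ j (hj : j < q.length), chainW g [] q[j] 1 = V + ((q.length : Int) - j) := by
  intro j hj
  have hdq : q.drop j = q[j] :: q.drop (j + 1) := List.drop_eq_getElem_cons hj
  have hhead : (q.drop j).headD z = q[j] := by rw [hdq]; rfl
  have hu := chain_unroll g (q.drop j) z (StepSeq_drop g q z hss j)
    (hnd.sublist (List.drop_sublist j q)) [] 1 (by simp)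
  rw [hhead, List.nil_append] at hu
  have hav := chainW_avoid g (((PySem.Dict.keys g).filter
      (fun x => !([] : List String).contains x)).length)
    [] (q.drop j) z (1 + ((q.drop j).length : Int)) (le_refl _)
    (fun x hx => havoid x (List.mem_of_mem_drop hx))
  rw [List.nil_append] at hav
  have hcnt := chainW_count g (((PySem.Dict.keys g).filter
      (fun x => !([] : List String).contains x)).length)
    [] z 1 ((q.drop j).length : Int) (le_refl _)
  rw [hu, hav, hcnt, hV]
  have : ((q.drop j).length : Int) = (q.length : Int) - j := by
    rw [List.length_drop]; omega
  rw [this]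

-- ---------- the invariant on B's value dict ----------

def InvB (g : PySem.Dict String String) (val : PySem.Dict String Int) : Prop :=
  (∀ x v, PySem.Dict.get? val x = some v → v = chainW g [] x 1) ∧
  (∀ x y, (PySem.Dict.get? val x).isSome → PySem.Dict.get? g x = some y →
      (PySem.Dict.get? val y).isSome)

-- With the closure half of the invariant, every node a walk from a memoized node examines
-- is memoized.
theorem traceW_val_subset (g : PySem.Dict String String) (val : PySem.Dict String Int)
    (hclo : ∀ x y, (PySem.Dict.get? val x).isSome → PySem.Dict.get? g x = some y →
      (PySem.Dict.get? val y).isSome) :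
    ∀ (μ : Nat) (v : List String) (z : String),
      ((PySem.Dict.keys g).filter (fun x => !v.contains x)).length ≤ μ →
      (PySem.Dict.get? val z).isSome →
      ∀ w ∈ traceW g v z, (PySem.Dict.get? val w).isSome := by
  intro μ
  induction μ using Nat.strong_induction_on with
  | _ μ ih =>
    intro v z hle hz w hw
    by_cases hv : z ∈ v
    · rw [traceW_mem g v z hv] at hw
      rw [List.mem_singleton.mp hw]; exact hz
    · cases hg : PySem.Dict.get? g z with
      | none =>
        rw [traceW_not_mem_none g v z hv hg] at hw
        rw [List.mem_singleton.mp hw]; exact hz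
      | some nxt =>
        rw [traceW_not_mem_some g v z nxt hv hg] at hw
        rcases List.mem_cons.mp hw with rfl | hw
        · exact hz
        · have hlt := pvFilter_add_lt (PySem.Dict.keys g) v z
            (pvMemKeys_of_get? g z nxt hg) (by simpa using hv)
          exact ih _ (by omega) (v ++ [z]) nxt (le_refl _) (hclo z nxt hz hg) w hw

-- ---------- walkB characterization ----------

theorem walkB_eq_none (g : PySem.Dict String String) (val : PySem.Dict String Int)
    (s : PySem.Set String) (p : List String) (node : String)
    (hg : PySem.Dict.get? g node = none) :
    walkB g val s p node = (p, s, node) := by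
  rw [walkB]; split
  · rfl
  · rename_i heq; rw [hg] at heq; cases heq

theorem walkB_eq_stop (g : PySem.Dict String String) (val : PySem.Dict String Int)
    (s : PySem.Set String) (p : List String) (node nxt : String)
    (hg : PySem.Dict.get? g node = some nxt)
    (hv : (PySem.Dict.contains val node || PySem.Set.contains s node) = true) :
    walkB g val s p node = (p, s, node) := by
  rw [walkB]; split
  · rename_i heq
    rw [hg] at heq
    all_goals cases heq
  · rename_i nxt' heq
    rw [hg] at heq; cases heq
    try rw [dif_pos hv]

theorem walkB_eq_go (g : PySem.Dict String String) (val : PySem.Dict String Int)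
    (s : PySem.Set String) (p : List String) (node nxt : String)
    (hg : PySem.Dict.get? g node = some nxt)
    (hv : (PySem.Dict.contains val node || PySem.Set.contains s node) = false) :
    walkB g val s p node = walkB g val (PySem.Set.add s node) (p ++ [node]) nxt := by
  conv_lhs => rw [walkB]
  split
  · rename_i heq
    rw [hg] at heq
    all_goals cases heq
  · rename_i nxt' heq
    rw [hg] at heq; cases heq
    rw [dif_neg (by rw [hv]; simp)]

theorem set_contains_iff (s : PySem.Set String) (w : String) :
    PySem.Set.contains s w = true ↔ w ∈ s := by
  simp [PySem.Set.contains]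

theorem walkB_spec (g : PySem.Dict String String) (val : PySem.Dict String Int) :
    ∀ (μ : Nat) (on_path : PySem.Set String) (path : List String) (node : String),
      ((PySem.Dict.keys g).filter (fun k => !PySem.Set.contains on_path k)).length ≤ μ →
      (∀ w, w ∈ on_path ↔ w ∈ path) →
      path.Nodup →
      (∀ x ∈ path, PySem.Dict.get? val x = none) →
      StepSeq g path node →
      ((∀ w, w ∈ (walkB g val on_path path node).2.1 ↔ w ∈ (walkB g val on_path path node).1) ∧
       (walkB g val on_path path node).1.Nodup ∧
       (∀ x ∈ (walkB g val on_path path node).1, PySem.Dict.get? val x = none) ∧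
       StepSeq g (walkB g val on_path path node).1 (walkB g val on_path path node).2.2 ∧
       (PySem.Dict.get? g (walkB g val on_path path node).2.2 = none ∨
         (PySem.Dict.get? val (walkB g val on_path path node).2.2).isSome ∨
         (walkB g val on_path path node).2.2 ∈ (walkB g val on_path path node).1) ∧
       (walkB g val on_path path node).1.headD (walkB g val on_path path node).2.2
         = path.headD node) := by
  intro μ
  induction μ using Nat.strong_induction_on with
  | _ μ ih =>
    intro on_path path node hle hmem hnd hval hss
    cases hg : PySem.Dict.get? g node with
    | none =>
      rw [walkB_eq_none g val on_path path node hg]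
      exact ⟨hmem, hnd, hval, hss, Or.inl hg, rfl⟩
    | some nxt =>
      cases hv : (PySem.Dict.contains val node || PySem.Set.contains on_path node) with
      | true =>
        rw [walkB_eq_stop g val on_path path node nxt hg hv]
        refine ⟨hmem, hnd, hval, hss, ?_, rfl⟩
        rcases Bool.or_eq_true_iff.mp hv with h | h
        · right; left
          rw [PySem.Dict.contains_eq_isSome_get?] at h
          exact h
        · right; right
          exact (hmem node).mp ((set_contains_iff on_path node).mp h)
      | false =>
        obtain ⟨h1, h2⟩ := Bool.or_eq_false_iff.mp hv
        have hvn : PySem.Dict.get? val node = none := by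
          rw [PySem.Dict.contains_eq_isSome_get?] at h1
          exact Option.not_isSome_iff_eq_none.mp (by simp [h1])
        have hnp : node ∉ path := fun h =>
          absurd ((set_contains_iff on_path node).mpr ((hmem node).mpr h)) (by simpa using h2)
        have hns : node ∉ on_path := fun h => hnp ((hmem node).mp h)
        have hadd : PySem.Set.add on_path node = on_path ++ [node] := by
          simp [PySem.Set.add, PySem.Set.contains, hns]
        rw [walkB_eq_go g val on_path path node nxt hg hv]
        have hlt := pvFilter_add_lt (PySem.Dict.keys g) on_path node
          (pvMemKeys_of_get? g node nxt hg) (by simpa using hns)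
        have hmem' : ∀ w, w ∈ PySem.Set.add on_path node ↔ w ∈ path ++ [node] := by
          intro w
          rw [hadd]
          simp [hmem w]
        have hnd' : (path ++ [node]).Nodup := by
          have h := List.nodup_cons.mpr ⟨hnp, hnd⟩
          exact List.nodup_append_comm.mp (by simpa using h)
        have hval' : ∀ x ∈ path ++ [node], PySem.Dict.get? val x = none := by
          intro x hx
          rcases List.mem_append.mp hx with hx | hx
          · exact hval x hx
          · rw [List.mem_singleton.mp hx]; exact hvn
        have hss' : StepSeq g (path ++ [node]) nxt := by
          apply StepSeq_append g path [node] nxt _ ⟨by simpa using hg, trivial⟩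
          simpa using hss
        have hlt2 : ((PySem.Dict.keys g).filter
            (fun k => !List.contains (on_path ++ [node]) k)).length
            < ((PySem.Dict.keys g).filter (fun k => !List.contains on_path k)).length :=
          pvFilter_add_lt (PySem.Dict.keys g) on_path node
            (pvMemKeys_of_get? g node nxt hg) (by simpa using hns)
        have hle2 : ((PySem.Dict.keys g).filter
            (fun k => !List.contains on_path k)).length ≤ μ := hle
        have hmeas : ((PySem.Dict.keys g).filter
            (fun k => !PySem.Set.contains (PySem.Set.add on_path node) k)).length ≤ μ - 1 := by
          rw [hadd]
          exact (by omega : ((PySem.Dict.keys g).filter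
            (fun k => !List.contains (on_path ++ [node]) k)).length ≤ μ - 1)
        have hres := ih (μ - 1) (by omega) (PySem.Set.add on_path node) (path ++ [node]) nxt
          hmeas hmem' hnd' hval' hss'
        refine ⟨hres.1, hres.2.1, hres.2.2.1, hres.2.2.2.1, hres.2.2.2.2.1, ?_⟩
        rw [hres.2.2.2.2.2, headD_append]
        rfl

-- ---------- dictionary bookkeeping ----------

theorem isSome_get?_insert (d : PySem.Dict String Int) (k : String) (v : Int) (x : String)
    (h : (PySem.Dict.get? d x).isSome) :
    (PySem.Dict.get? (PySem.Dict.insert d k v) x).isSome := by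
  rw [PySem.Dict.get?_insert]
  by_cases hx : x = k <;> simp [hx, h]

theorem get?_foldl_insert_const (l : List String) (b : Int) :
    ∀ (d : PySem.Dict String Int) (w : String),
      PySem.Dict.get? (l.foldl (fun v x => PySem.Dict.insert v x b) d) w
        = if w ∈ l then some b else PySem.Dict.get? d w := by
  induction l with
  | nil => intro d w; simp
  | cons x xs ih =>
    intro d w
    simp only [List.foldl_cons]
    rw [ih]
    by_cases hw : w ∈ xs
    · simp [hw]
    · rw [PySem.Dict.get?_insert]
      by_cases hwx : w = x
      · simp [hw, hwx]
      · simp [hw, hwx]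

-- ---------- the backward assignment loop ----------

theorem revAssign (g : PySem.Dict String String) :
    ∀ (q : List String) (val1 : PySem.Dict String Int) (base : Int) (w : String),
      InvB g val1 →
      (PySem.Dict.get? val1 w).isSome →
      StepSeq g q w →
      (∀ j (hj : j < q.length), chainW g [] q[j] 1 = base + ((q.length : Int) - j)) →
      (InvB g (q.reverse.foldl (fun (vb : PySem.Dict String Int × Int) x =>
          (PySem.Dict.insert vb.1 x (vb.2 + 1), vb.2 + 1)) (val1, base)).1 ∧
       (∀ x, (PySem.Dict.get? val1 x).isSome →
          (PySem.Dict.get? (q.reverse.foldl (fun (vb : PySem.Dict String Int × Int) x =>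
            (PySem.Dict.insert vb.1 x (vb.2 + 1), vb.2 + 1)) (val1, base)).1 x).isSome) ∧
       (∀ x ∈ q, (PySem.Dict.get? (q.reverse.foldl (fun (vb : PySem.Dict String Int × Int) x =>
            (PySem.Dict.insert vb.1 x (vb.2 + 1), vb.2 + 1)) (val1, base)).1 x).isSome)) := by
  intro q
  induction q using List.reverseRecOn with
  | nil => intro val1 base w hinv hw _ _; exact ⟨hinv, fun x h => h, by simp⟩
  | append_singleton ys y ihy =>
    intro val1 base w hinv hw hss hchain
    have hylen : (ys ++ [y]).length = ys.length + 1 := by simp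
    have hchy : chainW g [] y 1 = base + 1 := by
      have h := hchain ys.length (by simp)
      simp only [List.getElem_concat_length, hylen] at h
      rw [h]
      push_cast
      ring
    have hsucc : PySem.Dict.get? g y = some w := StepSeq_last g ys y w hss
    have hinv' : InvB g (PySem.Dict.insert val1 y (base + 1)) := by
      constructor
      · intro x v hv
        rw [PySem.Dict.get?_insert] at hv
        by_cases hx : x = y
        · rw [hx]
          simp [hx] at hv
          rw [← hv, hchy]
        · simp [hx] at hv
          exact hinv.1 x v hv
      · intro x z hx hz
        by_cases hxy : x = y
        · have : z = w := by
            rw [hxy, hsucc] at hz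
            exact (Option.some_inj.mp hz).symm
          rw [this]
          exact isSome_get?_insert val1 y (base + 1) w hw
        · rw [PySem.Dict.get?_insert] at hx
          simp [hxy] at hx
          exact isSome_get?_insert val1 y (base + 1) z (hinv.2 x z hx hz)
    have hssy : StepSeq g ys y := by
      have h := StepSeq_take g (ys ++ [y]) w hss ys.length
      rwa [List.take_left, List.drop_left, List.headD_cons] at h
    have hchain' : ∀ j (hj : j < ys.length),
        chainW g [] ys[j] 1 = (base + 1) + ((ys.length : Int) - j) := by
      intro j hj
      have h := hchain j (by simp only [hylen]; omega)
      simp only [List.getElem_append_left hj, hylen] at h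
      rw [h]
      push_cast
      ring
    have hy' : (PySem.Dict.get? (PySem.Dict.insert val1 y (base + 1)) y).isSome := by
      rw [PySem.Dict.get?_insert_self]; rfl
    have hres := ihy (PySem.Dict.insert val1 y (base + 1)) (base + 1) y hinv' hy' hssy hchain'
    have hfold : (ys ++ [y]).reverse.foldl (fun (vb : PySem.Dict String Int × Int) x =>
          (PySem.Dict.insert vb.1 x (vb.2 + 1), vb.2 + 1)) (val1, base)
        = ys.reverse.foldl (fun (vb : PySem.Dict String Int × Int) x =>
          (PySem.Dict.insert vb.1 x (vb.2 + 1), vb.2 + 1))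
          (PySem.Dict.insert val1 y (base + 1), base + 1) := by
      rw [List.reverse_append]
      rfl
    rw [hfold]
    refine ⟨hres.1, ?_, ?_⟩
    · intro x hx
      exact hres.2.1 x (isSome_get?_insert val1 y (base + 1) x hx)
    · intro x hx
      rcases List.mem_append.mp hx with hx | hx
      · exact hres.2.2 x hx
      · rw [List.mem_singleton.mp hx]
        exact hres.2.1 y hy'

-- ---------- correctness of one outer-loop iteration ----------

theorem stepB_spec (g : PySem.Dict String String) (val : PySem.Dict String Int) (start : String)
    (hinv : InvB g val) :
    InvB g (stepB g val start) ∧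
    (∀ x, (PySem.Dict.get? val x).isSome → (PySem.Dict.get? (stepB g val start) x).isSome) ∧
    ((PySem.Dict.get? g start).isSome → (PySem.Dict.get? (stepB g val start) start).isSome) := by
  obtain ⟨hmem, hnd, hvalp, hss, hstop, hhd⟩ := walkB_spec g val
    (((PySem.Dict.keys g).filter (fun k => !PySem.Set.contains PySem.Set.empty k)).length)
    PySem.Set.empty [] start (le_refl _) (by intro w; simp [PySem.Set.empty]) (by simp)
    (by simp) trivial
  have hhd' : (walkB g val PySem.Set.empty [] start).1.headD
      (walkB g val PySem.Set.empty [] start).2.2 = start := hhd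
  set r := walkB g val PySem.Set.empty [] start with hr
  -- start is covered by the returned path and stop node
  have hcover : ∀ (d : PySem.Dict String Int),
      (∀ x ∈ r.1, (PySem.Dict.get? d x).isSome) →
      (r.1 = [] → (PySem.Dict.get? d r.2.2).isSome) →
      (PySem.Dict.get? d start).isSome := by
    intro d hpath hnil
    cases hp : r.1 with
    | nil =>
      have : r.2.2 = start := by rw [← hhd', hp]; rfl
      rw [← this]; exact hnil hp
    | cons hd tl =>
      have : hd = start := by rw [← hhd', hp]; rfl
      rw [← this]
      exact hpath hd (by rw [hp]; simp)
  simp only [stepB]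
  rw [← hr]
  split_ifs with hcy hkn
  all_goals dsimp only
  -- ===== cycle case =====
  · have hzp : r.2.2 ∈ r.1 := (hmem _).mp ((set_contains_iff _ _).mp hcy)
    obtain ⟨i, hi⟩ := Option.isSome_iff_exists.mp ((PySem.List.index?_isSome_iff _ _).mpr hzp)
    obtain ⟨hilt, hgeti, -⟩ := PySem.List.getElem_of_index?_eq_some hi
    simp only [hi, Option.getD_some]
    have hcyccons : r.1.drop i = r.2.2 :: r.1.drop (i + 1) := by
      rw [List.drop_eq_getElem_cons hilt, hgeti]
    have hcychead : (r.1.drop i).headD r.2.2 = r.2.2 := by rw [hcyccons]; rfl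
    have hzcyc : r.2.2 ∈ r.1.drop i := by rw [hcyccons]; simp
    have hsscyc : StepSeq g (r.1.drop i) r.2.2 := StepSeq_drop g r.1 r.2.2 hss i
    have hndcyc : (r.1.drop i).Nodup := hnd.sublist (List.drop_sublist i r.1)
    have hcycval : ∀ x ∈ r.1.drop i,
        chainW g [] x 1 = (r.1.length : Int) - (i : Int) + 1 := by
      intro x hx
      rw [cycle_chain g (r.1.drop i) r.2.2 hsscyc hndcyc hcychead x hx, List.length_drop]
      omega
    have hval1 : ∀ w, PySem.Dict.get? ((r.1.drop i).foldl
        (fun v x => PySem.Dict.insert v x ((r.1.length : Int) - (i : Int) + 1)) val) w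
        = if w ∈ r.1.drop i then some ((r.1.length : Int) - (i : Int) + 1)
          else PySem.Dict.get? val w := by
      intro w; exact get?_foldl_insert_const (r.1.drop i) _ val w
    have hinv1 : InvB g ((r.1.drop i).foldl
        (fun v x => PySem.Dict.insert v x ((r.1.length : Int) - (i : Int) + 1)) val) := by
      constructor
      · intro x v hvv
        rw [hval1] at hvv
        by_cases hx : x ∈ r.1.drop i
        · rw [if_pos hx] at hvv
          rw [← Option.some_inj.mp hvv]
          exact (hcycval x hx).symm
        · rw [if_neg hx] at hvv
          exact hinv.1 x v hvv
      · intro x y hx hy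
        rw [hval1] at hx
        rw [hval1]
        by_cases hx' : x ∈ r.1.drop i
        · rcases StepSeq_succ g (r.1.drop i) r.2.2 hsscyc x hx' y hy with h | h
          · simp [h]
          · rw [h]; simp [hzcyc]
        · rw [if_neg hx'] at hx
          have := hinv.2 x y hx hy
          by_cases hy' : y ∈ r.1.drop i
          · simp [hy']
          · simp [hy', this]
    have hz1 : (PySem.Dict.get? ((r.1.drop i).foldl
        (fun v x => PySem.Dict.insert v x ((r.1.length : Int) - (i : Int) + 1)) val)
        r.2.2).isSome := by
      rw [hval1, if_pos hzcyc]; rfl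
    have hssq : StepSeq g (r.1.take i) r.2.2 := by
      have h := StepSeq_take g r.1 r.2.2 hss i
      rwa [hcychead] at h
    have hdisj : ∀ x ∈ r.1.take i, x ∉ r.1.drop i := by
      have hnd2 : (r.1.take i ++ r.1.drop i).Nodup := by
        rw [List.take_append_drop]; exact hnd
      intro x hx
      exact (List.Nodup.disjoint hnd2) hx
    have htr : traceW g [] r.2.2 = r.1.drop i ++ [r.2.2] := by
      have h := trace_unroll g (r.1.drop i) r.2.2 hsscyc hndcyc [] (by simp)
      rw [hcychead, List.nil_append] at h
      rw [h, traceW_mem g (r.1.drop i) r.2.2 hzcyc]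
    have havoid : ∀ x ∈ r.1.take i, x ∉ traceW g [] r.2.2 := by
      intro x hx h
      rw [htr] at h
      rcases List.mem_append.mp h with h | h
      · exact hdisj x hx h
      · exact hdisj x hx ((List.mem_singleton.mp h) ▸ hzcyc)
    have hVz : chainW g [] r.2.2 1 = (r.1.length : Int) - (i : Int) + 1 :=
      hcycval r.2.2 hzcyc
    have hch := tail_chain g (r.1.take i) r.2.2 ((r.1.length : Int) - (i : Int) + 1)
      hssq (hnd.sublist (List.take_sublist i r.1)) havoid hVz
    obtain ⟨hI1, hmono1, hmemq⟩ := revAssign g (r.1.take i)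
      ((r.1.drop i).foldl
        (fun v x => PySem.Dict.insert v x ((r.1.length : Int) - (i : Int) + 1)) val)
      ((r.1.length : Int) - (i : Int) + 1) r.2.2 hinv1 hz1 hssq hch
    refine ⟨hI1, ?_, ?_⟩
    · intro x hx
      apply hmono1
      rw [hval1]
      by_cases hx' : x ∈ r.1.drop i
      · simp [hx']
      · simp [hx', hx]
    · intro _
      apply hcover
      · intro x hx
        rw [← List.take_append_drop i r.1] at hx
        rcases List.mem_append.mp hx with hx | hx
        · exact hmemq x hx
        · apply hmono1
          rw [hval1, if_pos hx]; rfl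
      · intro hp
        exact absurd (hp ▸ hzp) (List.not_mem_nil)
  -- ===== memoized case =====
  · have hzk : (PySem.Dict.get? val r.2.2).isSome := by
      rw [PySem.Dict.contains_eq_isSome_get?] at hkn
      exact hkn
    obtain ⟨v0, hv0⟩ := Option.isSome_iff_exists.mp hzk
    have hgd : PySem.Dict.getD val r.2.2 0 = v0 := by
      rw [PySem.Dict.getD_eq_get?_getD, hv0]; rfl
    rw [hgd]
    have hV : chainW g [] r.2.2 1 = v0 := (hinv.1 _ _ hv0).symm
    have havoid : ∀ x ∈ r.1, x ∉ traceW g [] r.2.2 := by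
      intro x hx h
      have hsub := traceW_val_subset g val hinv.2
        (((PySem.Dict.keys g).filter (fun k => !([] : List String).contains k)).length)
        [] r.2.2 (le_refl _) hzk x h
      rw [hvalp x hx] at hsub
      simp at hsub
    have hch := tail_chain g r.1 r.2.2 v0 hss hnd havoid hV
    obtain ⟨hI, hmono1, hmemq⟩ := revAssign g r.1 val v0 r.2.2 hinv hzk hss hch
    refine ⟨hI, hmono1, ?_⟩
    · intro _
      apply hcover
      · exact hmemq
      · intro hp
        exact hmono1 r.2.2 hzk
  -- ===== dead-end case =====
  · have hzn : PySem.Dict.get? val r.2.2 = none := by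
      rw [PySem.Dict.contains_eq_isSome_get?] at hkn
      exact Option.not_isSome_iff_eq_none.mp (by simpa using hkn)
    have hznp : r.2.2 ∉ r.1 := fun h =>
      hcy ((set_contains_iff _ _).mpr ((hmem _).mpr h))
    have hgz : PySem.Dict.get? g r.2.2 = none := by
      rcases hstop with h | h | h
      · exact h
      · rw [hzn] at h; simp at h
      · exact absurd h hznp
    have hVz : chainW g [] r.2.2 1 = 1 :=
      chainW_not_mem_none g [] r.2.2 1 (by simp) hgz
    have hinv1 : InvB g (PySem.Dict.insert val r.2.2 1) := by
      constructor
      · intro x v hvv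
        rw [PySem.Dict.get?_insert] at hvv
        by_cases hx : x = r.2.2
        · rw [if_pos hx] at hvv
          rw [hx, ← Option.some_inj.mp hvv, hVz]
        · rw [if_neg hx] at hvv
          exact hinv.1 x v hvv
      · intro x y hx hy
        by_cases hx' : x = r.2.2
        · rw [hx', hgz] at hy; cases hy
        · rw [PySem.Dict.get?_insert, if_neg hx'] at hx
          exact isSome_get?_insert val r.2.2 1 y (hinv.2 x y hx hy)
    have hz1 : (PySem.Dict.get? (PySem.Dict.insert val r.2.2 1) r.2.2).isSome := by
      rw [PySem.Dict.get?_insert_self]; rfl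
    have havoid : ∀ x ∈ r.1, x ∉ traceW g [] r.2.2 := by
      intro x hx h
      rw [traceW_not_mem_none g [] r.2.2 (by simp) hgz] at h
      exact hznp ((List.mem_singleton.mp h) ▸ hx)
    have hch := tail_chain g r.1 r.2.2 1 hss hnd havoid hVz
    obtain ⟨hI, hmono1, hmemq⟩ := revAssign g r.1 (PySem.Dict.insert val r.2.2 1) 1 r.2.2
      hinv1 hz1 hss hch
    refine ⟨hI, ?_, ?_⟩
    · intro x hx
      exact hmono1 x (isSome_get?_insert val r.2.2 1 x hx)
    · intro _
      apply hcover
      · exact hmemq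
      · intro hp
        exact hmono1 r.2.2 hz1

-- ---------- the outer fold over the keys ----------

theorem foldl_stepB_spec (g : PySem.Dict String String) (ks : List String) :
    ∀ (val : PySem.Dict String Int), InvB g val →
      InvB g (ks.foldl (fun v k => stepB g v k) val) ∧
      (∀ x, (PySem.Dict.get? val x).isSome →
        (PySem.Dict.get? (ks.foldl (fun v k => stepB g v k) val) x).isSome) ∧
      (∀ k ∈ ks, (PySem.Dict.get? g k).isSome →
        (PySem.Dict.get? (ks.foldl (fun v k => stepB g v k) val) k).isSome) := by
  induction ks with
  | nil => intro val hinv; exact ⟨hinv, fun x h => h, by simp⟩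
  | cons k ks ih =>
    intro val hinv
    obtain ⟨hI, hmono, hself⟩ := stepB_spec g val k hinv
    obtain ⟨hI2, hmono2, hmem2⟩ := ih (stepB g val k) hI
    refine ⟨hI2, ?_, ?_⟩
    · intro x hx
      exact hmono2 x (hmono x hx)
    · intro k' hk' hg'
      rcases List.mem_cons.mp hk' with rfl | hk'
      · exact hmono2 k' (hself hg')
      · exact hmem2 k' hk' hg'

theorem invB_empty (g : PySem.Dict String String) : InvB g PySem.Dict.empty := by
  constructor
  · intro x v h
    rw [PySem.Dict.get?_empty] at h
    cases h
  · intro x y h _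
    rw [PySem.Dict.get?_empty] at h
    simp at h

theorem getD_valF (g : PySem.Dict String String) :
    ∀ k ∈ PySem.Dict.keys g,
      PySem.Dict.getD ((PySem.Dict.keys g).foldl (fun val k => stepB g val k)
        PySem.Dict.empty) k 0 = chainW g [] k 1 := by
  intro k hk
  have hkS : (PySem.Dict.get? g k).isSome := by
    cases h : PySem.Dict.get? g k with
    | none => exact absurd hk ((PySem.Dict.get?_eq_none_iff_not_mem_keys g k).mp h)
    | some v => rfl
  obtain ⟨hI, -, hmem⟩ := foldl_stepB_spec g (PySem.Dict.keys g) PySem.Dict.empty (invB_empty g)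
  obtain ⟨v, hv⟩ := Option.isSome_iff_exists.mp (hmem k hk hkS)
  rw [PySem.Dict.getD_eq_get?_getD, hv, Option.getD_some]
  exact hI.1 k v hv

-- ===== VERDICT (by name: the statement is the Claim_ definition above) =====
theorem dfs_spec : Claim_equal_dfs := by
  intro graph _ _
  unfold Spec_dfs dfs dfs_alt
  simp only []
  rw [PySem.List.foldl_pyRange_zero_pyGetD' (PySem.Dict.keys (PySem.Dict.ofList graph)) ""
    (fun counts k => dfsLoopA (PySem.Dict.ofList graph) [] [k] 1 counts) []]
  rw [dfs_foldl_eq]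
  have hmapeq : (PySem.Dict.keys (PySem.Dict.ofList graph)).map
      (fun k => PySem.Dict.getD ((PySem.Dict.keys (PySem.Dict.ofList graph)).foldl
        (fun val k => stepB (PySem.Dict.ofList graph) val k) PySem.Dict.empty) k 0)
      = (PySem.Dict.keys (PySem.Dict.ofList graph)).map
        (fun k => chainW (PySem.Dict.ofList graph) [] k 1) :=
    List.map_congr_left (getD_valF (PySem.Dict.ofList graph))
  rw [hmapeq]
  simp
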